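-- pv_equiv track=rewrite | github.com/ShinUngJae/programmers | programmers/Python/level 1/부족한 금액 계산하기.py | solution
-- ===== SOURCE A (Python) =====
-- def solution(price, money, count) :
--
--     fee = price
--
--     for i in range(count) :
--       money -= fee
--       fee += price
--
--     if money >= 0 :
--       answer = 0
--     else :
--       answer = abs(money)
--
--     return answer
-- ===== SOURCE B (Python) =====
-- def solution(price, money, count):
--     n = count if count > 0 else 0
--     total = price * n * (n + 1) // 2
--     return max(0, total - money)
-- ===== Notes on version B (the rewrite author's own statement) =====
-- stated objective: faster
-- what changed: Replaced the O(count) fee-accumulation loop by the closed-form arithmetic-series formula price*n*(n+1)//2 and a max with 0.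
import Mathlib
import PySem

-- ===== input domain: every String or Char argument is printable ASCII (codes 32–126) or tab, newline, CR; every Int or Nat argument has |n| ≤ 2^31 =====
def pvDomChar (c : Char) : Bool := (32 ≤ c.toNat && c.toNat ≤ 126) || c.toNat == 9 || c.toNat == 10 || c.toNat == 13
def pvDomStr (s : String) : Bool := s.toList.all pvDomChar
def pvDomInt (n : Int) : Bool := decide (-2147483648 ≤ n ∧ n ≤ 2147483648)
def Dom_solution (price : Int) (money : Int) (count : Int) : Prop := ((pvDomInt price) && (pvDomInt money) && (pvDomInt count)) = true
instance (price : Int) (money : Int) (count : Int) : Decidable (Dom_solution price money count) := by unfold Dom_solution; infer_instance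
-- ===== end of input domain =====

-- B replaces A's fee-accumulation loop by the closed-form arithmetic series price*n*(n+1)//2 (objective: faster, O(1) vs O(count)).

-- ===== PORT A =====
-- fee = price; for i in range(count): money -= fee; fee += price; then 0 or abs(money)
def solution (price : Int) (money : Int) (count : Int) : Int :=
  let st := (PySem.List.pyRange 0 count 1).foldl
    (fun (s : Int × Int) _ => (s.1 - s.2, s.2 + price)) (money, price)
  if st.1 ≥ 0 then 0 else |st.1|

-- ===== PORT B =====
-- n = count if count > 0 else 0; total = price*n*(n+1)//2; max(0, total - money)
def solution_alt (price : Int) (money : Int) (count : Int) : Int :=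
  let n : Int := if count > 0 then count else 0
  let total : Int := PySem.Int.floordiv (price * n * (n + 1)) 2
  max 0 (total - money)

-- ===== PRECONDITION & SPEC =====
def Spec_solution (price : Int) (money : Int) (count : Int) (out : Int) : Prop := out = solution_alt price money count
instance (price : Int) (money : Int) (count : Int) (out : Int) : Decidable (Spec_solution price money count out) := by unfold Spec_solution; infer_instance

-- ===== CLAIM (what is proved, stated in full; the proofs are below) =====
def Claim_equal_solution : Prop := ∀ (price : Int) (money : Int) (count : Int), Dom_solution price money count → Spec_solution price money count (solution price money count)

-- ===== LEMMAS AND PROOFS =====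

-- A's loop ignores the range elements: its effect depends only on the list's length.
lemma loop_fst (price : Int) : ∀ (l : List Int) (m f : Int),
    (l.foldl (fun (s : Int × Int) _ => (s.1 - s.2, s.2 + price)) (m, f)).1
      = m - f * l.length - price * ∑ i ∈ Finset.range l.length, (i : Int) := by
  intro l
  induction l with
  | nil => intro m f; simp
  | cons a l ih =>
      intro m f
      simp only [List.foldl_cons, List.length_cons]
      rw [ih (m - f) (f + price), Finset.sum_range_succ]
      push_cast
      ring

-- Gauss: twice the sum of 0..n-1 equals n*(n-1) (cast of Mathlib's Nat lemma).
lemma gauss (n : ℕ) : (2 : Int) * ∑ i ∈ Finset.range n, (i : Int) = (n : Int) * ((n : Int) - 1) := by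
  have h := Finset.sum_range_id_mul_two n
  have : ((∑ i ∈ Finset.range n, i) * 2 : ℕ) = (n * (n - 1) : ℕ) := h
  rcases n with _ | k
  · simp
  · have hc := congrArg (fun x : ℕ => (x : Int)) this
    push_cast at hc
    push_cast
    linarith

lemma floordiv_two_of_double (T : Int) : PySem.Int.floordiv (2 * T) 2 = T := by
  rw [PySem.Int.floordiv_eq_ediv_of_pos (by norm_num : (0:Int) < 2)]
  exact Int.mul_ediv_cancel_left T (by norm_num)

-- ===== VERDICT (by name: the statement is the Claim_ definition above) =====
theorem solution_spec : Claim_equal_solution := by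
  intro price money count _
  unfold Spec_solution solution solution_alt
  by_cases hc : count > 0
  · -- the loop runs count times
    have hlen : ((PySem.List.pyRange 0 count 1).length : Int) = count := by
      rw [PySem.List.length_pyRange_one]
      omega
    set k := (PySem.List.pyRange 0 count 1).length with hk
    set S : Int := ∑ i ∈ Finset.range k, (i : Int) with hS
    have hfst := loop_fst price (PySem.List.pyRange 0 count 1) money price
    have hg : (2 : Int) * S = (k : Int) * ((k : Int) - 1) := gauss k
    have hprod : price * count * (count + 1) = 2 * (price * count + price * S) := by
      rw [← hlen]; linear_combination (-price) * hg
    simp only [hfst, ← hS, ← hk, if_pos hc, hprod, floordiv_two_of_double, hlen]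
    set T : Int := price * count + price * S with hT
    have : money - price * count - price * S = money - T := by rw [hT]; ring
    rw [this]
    split_ifs with h
    · omega
    · rw [abs_of_neg (by omega : money - T < 0)]; omega
  · -- count ≤ 0: empty loop, n = 0
    rw [PySem.List.pyRange_one_eq_nil (by omega : count ≤ 0)]
    simp only [List.foldl_nil, if_neg hc]
    have : PySem.Int.floordiv (price * 0 * (0 + 1)) 2 = 0 := by
      norm_num [PySem.Int.floordiv_eq_ediv_of_pos]
    rw [this]
    split_ifs with h
    · omega
    · rw [abs_of_neg (by omega : money < 0)]; omega
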